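-- pv_equiv track=rewrite | github.com/rosygit-creator/Python_practice | Arrays/non_decreasing_sub.py | non_decreas_sub
-- ===== SOURCE A (Python) =====
-- def non_decreas_sub(a):
--     l=[]
--     for i in range(0, len(a)):
--         for j in range(i+1, len(a)):
--             temp=a[i:j+1]
--             if(non_decreasing(temp)):
--                 l.append([temp])
--
--
--
--     return l
--
-- def non_decreasing(t):
--     flag=False
--     for j in range(1,len(t)):
--        if t[j-1]<=t[j]:
--            flag=True
--        else:
--            flag=False
--            break
--
--
--
--     return flag
-- ===== SOURCE B (Python) =====
-- def non_decreas_sub(a):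
--     l = []
--     n = len(a)
--     for i in range(n):
--         for j in range(i + 1, n):
--             if a[j - 1] <= a[j]:
--                 l.append([a[i:j + 1]])
--             else:
--                 break
--     return l
-- ===== Notes on version B (the rewrite author's own statement) =====
-- stated objective: faster
-- what changed: Instead of materialising every a[i:j+1] slice and rescanning it with non_decreasing, B extends each start index i one comparison a[j-1]<=a[j] at a time and breaks at the first violation, so only emitted subarrays cost work.
import Mathlib
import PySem

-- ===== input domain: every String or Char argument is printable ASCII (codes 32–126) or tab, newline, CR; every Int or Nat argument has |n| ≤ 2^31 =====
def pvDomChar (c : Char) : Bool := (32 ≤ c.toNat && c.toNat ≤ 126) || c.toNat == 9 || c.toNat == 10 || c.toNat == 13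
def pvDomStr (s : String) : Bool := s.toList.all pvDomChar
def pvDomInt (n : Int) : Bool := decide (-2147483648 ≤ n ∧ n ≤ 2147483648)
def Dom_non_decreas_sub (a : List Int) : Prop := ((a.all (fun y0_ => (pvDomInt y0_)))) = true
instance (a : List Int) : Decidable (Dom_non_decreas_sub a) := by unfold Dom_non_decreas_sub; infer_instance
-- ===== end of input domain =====

-- B replaces A's per-subarray rescan (non_decreasing over every slice) by a single comparison per
-- step with an early break once the run ends; equal return value on all inputs.

-- ===== PORT A =====
-- A's helper non_decreasing: loop over range(1, len(t)) with a break, flag accumulator.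
-- indices j-1, j are always in range here, so pyGetD with default 0 is exact.
def nonDecLoop (t : List Int) (js : List Int) (flag : Bool) : Bool :=
  match js with
  | [] => flag
  | j :: rest =>
      if PySem.List.pyGetD t (j-1) 0 ≤ PySem.List.pyGetD t j 0 then
        nonDecLoop t rest true
      else false

def non_decreasing (t : List Int) : Bool :=
  nonDecLoop t (PySem.List.pyRange 1 (t.length : Int) 1) false

def non_decreas_sub (a : List Int) : List (List (List Int)) :=
  (PySem.List.pyRange 0 (a.length : Int) 1).foldl (fun l i =>
    (PySem.List.pyRange (i+1) (a.length : Int) 1).foldl (fun l j =>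
      let temp := PySem.List.slice a (some i) (some (j+1))
      if non_decreasing temp then l ++ [[temp]] else l) l) []

-- ===== PORT B =====
-- inner 'for j in range(i+1, n): if a[j-1] <= a[j]: append else break' (break → recursion);
-- indices j-1, j are always in range here, so pyGetD with default 0 is exact.
def innerB (a : List Int) (i : Int) (js : List Int) (acc : List (List (List Int))) :
    List (List (List Int)) :=
  match js with
  | [] => acc
  | j :: rest =>
      if PySem.List.pyGetD a (j-1) 0 ≤ PySem.List.pyGetD a j 0 then
        innerB a i rest (acc ++ [[PySem.List.slice a (some i) (some (j+1))]])
      else acc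

def non_decreas_sub_alt (a : List Int) : List (List (List Int)) :=
  (PySem.List.pyRange 0 (a.length : Int) 1).foldl (fun l i =>
    innerB a i (PySem.List.pyRange (i+1) (a.length : Int) 1) l) []

-- ===== PRECONDITION & SPEC =====
def Spec_non_decreas_sub (a : List Int) (out : List (List (List Int))) : Prop := out = non_decreas_sub_alt a
instance (a : List Int) (out : List (List (List Int))) : Decidable (Spec_non_decreas_sub a out) := by unfold Spec_non_decreas_sub; infer_instance

-- ===== CLAIM (what is proved, stated in full; the proofs are below) =====
def Claim_equal_non_decreas_sub : Prop := ∀ (a : List Int), Dom_non_decreas_sub a → Spec_non_decreas_sub a (non_decreas_sub a)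

-- ===== LEMMAS AND PROOFS =====

-- Q a k: the comparison a[k-1] <= a[k]
def pvQ (a : List Int) (k : Int) : Bool :=
  decide (PySem.List.pyGetD a (k-1) 0 ≤ PySem.List.pyGetD a k 0)

lemma nonDecLoop_all (t : List Int) (js : List Int) (flag : Bool) (h : js ≠ []) :
    nonDecLoop t js flag = js.all (pvQ t) := by
  induction js generalizing flag with
  | nil => exact absurd rfl h
  | cons j rest ih =>
      by_cases hr : rest = []
      · subst hr
        simp [nonDecLoop, pvQ, List.all]
      · simp only [nonDecLoop, List.all_cons, pvQ]
        by_cases hq : PySem.List.pyGetD t (j-1) 0 ≤ PySem.List.pyGetD t j 0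
        · simp [hq, ih true hr]
        · simp [hq]

lemma getD_take_drop (a : List Int) (p L m : Nat) (h1 : m < L) :
    ((a.drop p).take L).getD m 0 = a.getD (p + m) 0 := by
  rw [List.getD_eq_getElem?_getD, List.getD_eq_getElem?_getD]
  rw [List.getElem?_take_of_lt h1, List.getElem?_drop]

lemma P_char (a : List Int) (i j : Int) (hi : 0 ≤ i) (hij : i < j) (hj : j < (a.length : Int)) :
    non_decreasing (PySem.List.slice a (some i) (some (j+1)))
      = (PySem.List.pyRange (i+1) (j+1) 1).all (pvQ a) := by
  set p : Nat := i.toNat with hp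
  have hip : i = (p : Int) := by omega
  have hjn : (j+1).toNat ≤ a.length := by omega
  have htake : PySem.List.slice a (some i) (some (j+1)) = (a.drop p).take ((j+1).toNat - p) := by
    rw [PySem.List.slice_toNat a hi (by omega)]
  set L : Nat := (j+1).toNat - p with hL
  have hlen : ((a.drop p).take L).length = L := by
    simp [List.length_take, List.length_drop]
    omega
  have h2L : 2 ≤ L := by omega
  rw [non_decreasing, htake, hlen]
  rw [nonDecLoop_all _ _ _ (by
    have : (1:Int) < (L:Int) := by exact_mod_cast h2L
    rw [PySem.List.pyRange_one_cons this]; simp)]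
  rw [PySem.List.pyRange_one, PySem.List.pyRange_one]
  rw [List.all_map, List.all_map]
  have hcard : ((L:Int) - 1).toNat = ((j+1) - (i+1)).toNat := by omega
  rw [hcard]
  have hpt : ∀ k : Nat, k < ((j+1) - (i+1)).toNat →
      pvQ ((a.drop p).take L) (1 + (k:Int)) = pvQ a (i + 1 + (k:Int)) := by
    intro k hk'
    have hkL : k + 1 < L := by omega
    unfold pvQ
    have e1 : (1:Int) + (k:Int) - 1 = ((k:Nat) : Int) := by omega
    have e2 : (1:Int) + (k:Int) = (((k+1:Nat)) : Int) := by push_cast; omega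
    have e3 : i + 1 + (k:Int) - 1 = (((p+k:Nat)) : Int) := by omega
    have e4 : i + 1 + (k:Int) = (((p+k+1:Nat)) : Int) := by omega
    rw [e1, e2, e3, e4, PySem.List.pyGetD_natCast, PySem.List.pyGetD_natCast,
        PySem.List.pyGetD_natCast, PySem.List.pyGetD_natCast]
    rw [getD_take_drop a p L k (by omega),
        getD_take_drop a p L (k+1) hkL]
    have : p + (k+1) = p + k + 1 := by omega
    rw [this]
  apply Bool.eq_iff_iff.mpr
  simp only [List.all_eq_true, List.mem_range, Function.comp]
  constructor
  · intro h k hk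
    rw [← hpt k hk]
    exact h k hk
  · intro h k hk
    rw [hpt k hk]
    exact h k hk

lemma inner_eq (a : List Int) (i : Int) (hi : 0 ≤ i) :
    ∀ (fuel : Nat) (s : Int) (acc : List (List (List Int))),
      i + 1 ≤ s → fuel = ((a.length : Int) - s).toNat →
      (∀ k, i + 1 ≤ k → k < s → pvQ a k = true) →
      (PySem.List.pyRange s (a.length : Int) 1).foldl
        (fun l j =>
          let temp := PySem.List.slice a (some i) (some (j+1))
          if non_decreasing temp then l ++ [[temp]] else l) acc
      = innerB a i (PySem.List.pyRange s (a.length : Int) 1) acc := by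
  intro fuel
  induction fuel with
  | zero =>
      intro s acc hs hf hinv
      have : (a.length : Int) ≤ s := by omega
      rw [PySem.List.pyRange_one_eq_nil this]
      simp [innerB]
  | succ m ih =>
      intro s acc hs hf hinv
      by_cases hlt : s < (a.length : Int)
      · rw [PySem.List.pyRange_one_cons hlt]
        simp only [List.foldl_cons, innerB]
        have hP : non_decreasing (PySem.List.slice a (some i) (some (s+1)))
            = (PySem.List.pyRange (i+1) (s+1) 1).all (pvQ a) :=
          P_char a i s hi (by omega) hlt
        have hsplit : PySem.List.pyRange (i+1) (s+1) 1
            = PySem.List.pyRange (i+1) s 1 ++ [s] := PySem.List.pyRange_one_succ_right hs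
        have hpre : (PySem.List.pyRange (i+1) s 1).all (pvQ a) = true := by
          rw [List.all_eq_true]
          intro k hk
          have := (PySem.List.mem_pyRange_one).mp hk
          exact hinv k this.1 this.2
        by_cases hq : PySem.List.pyGetD a (s-1) 0 ≤ PySem.List.pyGetD a s 0
        · have hqs : pvQ a s = true := by simp [pvQ, hq]
          have hPt : non_decreasing (PySem.List.slice a (some i) (some (s+1))) = true := by
            rw [hP, hsplit, List.all_append]
            simp [hpre, hqs]
          rw [if_pos hq]
          simp only [hPt, if_true]
          rw [ih (s+1) (acc ++ [[PySem.List.slice a (some i) (some (s+1))]]) (by omega) (by omega)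
            (fun k hk1 hk2 => by
              by_cases hks : k < s
              · exact hinv k hk1 hks
              · have : k = s := by omega
                rw [this]; exact hqs)]
        · -- break: every later slice contains the failing comparison at s
          have hqs : pvQ a s = false := by simp [pvQ, hq]
          have hPf : non_decreasing (PySem.List.slice a (some i) (some (s+1))) = false := by
            rw [hP, hsplit, List.all_append]
            simp [hqs]
          rw [if_neg hq]
          simp only [hPf, Bool.false_eq_true, if_false]
          rw [PySem.List.foldl_append_if
            (fun j => non_decreasing (PySem.List.slice a (some i) (some (j+1))))
            (fun j => [PySem.List.slice a (some i) (some (j+1))])]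
          have hnil : (PySem.List.pyRange (s+1) (a.length : Int) 1).filter
              (fun j => non_decreasing (PySem.List.slice a (some i) (some (j+1)))) = [] := by
            apply List.filter_eq_nil_iff.mpr
            intro j hj
            have hmem := (PySem.List.mem_pyRange_one).mp hj
            rw [P_char a i j hi (by omega) hmem.2]
            intro hall
            have hsm : s ∈ PySem.List.pyRange (i+1) (j+1) 1 :=
              (PySem.List.mem_pyRange_one).mpr ⟨hs, by omega⟩
            have := List.all_eq_true.mp hall s hsm
            rw [hqs] at this
            exact Bool.false_ne_true this
          rw [hnil]
          simp
      · rw [PySem.List.pyRange_one_eq_nil (by omega)]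
        simp [innerB]

-- ===== VERDICT (by name: the statement is the Claim_ definition above) =====
theorem non_decreas_sub_spec : Claim_equal_non_decreas_sub := by
  intro a _
  unfold Spec_non_decreas_sub non_decreas_sub non_decreas_sub_alt
  apply PySem.List.foldl_congr_mem
  intro acc i hi
  have h0i : 0 ≤ i := ((PySem.List.mem_pyRange_one).mp hi).1
  exact inner_eq a i h0i (((a.length : Int) - (i+1)).toNat) (i+1) acc le_rfl rfl
    (fun k hk1 hk2 => absurd (lt_of_le_of_lt hk1 hk2) (lt_irrefl _))
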